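-- pv_equiv track=rewrite | github.com/ajitnilakantan/puzzles | advent-of-code/2020/06/solution.py | count_common_letters
-- ===== SOURCE A (Python) =====
-- def count_common_letters(line):
--     sets = []
--     lines = line.split('\n')
--     for l in lines:
--         s = set()
--         for c in l:
--             s.add(c)
--         sets.append(s)
--     intersect = sets[0]
--     for s in sets:
--         intersect = intersect.intersection(s)
--     return len(intersect)
-- ===== SOURCE B (Python) =====
-- def count_common_letters(line):
--     lines = line.split('\n')
--     n = len(lines)
--     tally = {}
--     for l in lines:
--         for c in set(l):
--             tally[c] = tally.get(c, 0) + 1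
--     return sum(1 for v in tally.values() if v == n)
-- ===== Notes on version B (the rewrite author's own statement) =====
-- stated objective: faster
-- what changed: Replaces building a per-line list of sets and repeatedly intersecting them with a single frequency table: each distinct character of each line bumps a tally, and the answer is the number of characters whose tally equals the number of lines.
import Mathlib
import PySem

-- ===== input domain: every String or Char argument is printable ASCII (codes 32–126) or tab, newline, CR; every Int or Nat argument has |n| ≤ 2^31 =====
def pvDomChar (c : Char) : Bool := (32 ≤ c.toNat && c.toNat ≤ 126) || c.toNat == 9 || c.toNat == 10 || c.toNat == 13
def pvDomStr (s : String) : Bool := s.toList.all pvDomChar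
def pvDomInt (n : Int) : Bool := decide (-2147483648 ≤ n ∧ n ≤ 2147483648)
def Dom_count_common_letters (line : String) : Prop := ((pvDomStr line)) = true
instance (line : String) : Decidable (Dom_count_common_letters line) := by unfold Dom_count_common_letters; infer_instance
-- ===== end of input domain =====

-- B replaces the list-of-sets + repeated-intersection of A with one character tally
-- filtered against the line count at the end (alternative decomposition, similar cost).


-- ===== PORT A =====
def count_common_letters (line : String) : Int :=
  -- split? is `some` whenever the separator is nonempty, so `.getD []` is never used
  let lines := (PySem.Str.split? line "\n").getD []
  let sets := lines.foldl
    (fun sets l => sets ++ [l.toList.foldl (fun s c => PySem.Set.add s c) PySem.Set.empty]) []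
  match sets with
  | [] => 0   -- unreachable: split always yields at least one piece, so sets[0] exists
  | s0 :: _ => ((sets.foldl (fun i s => PySem.Set.inter i s) s0).length : Int)

-- ===== PORT B =====
def count_common_letters_alt (line : String) : Int :=
  -- split? is `some` whenever the separator is nonempty, so `.getD []` is never used
  let lines := (PySem.Str.split? line "\n").getD []
  let n := lines.length
  let tally := lines.foldl
    (fun d l => (PySem.Set.ofList l.toList).foldl (fun d c => PySem.Dict.modify d c 0 (· + 1)) d)
    (PySem.Dict.empty : PySem.Dict Char Int)
  ((tally.values.countP (fun v => v == (n : Int))) : Int)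

-- ===== PRECONDITION & SPEC =====
def Spec_count_common_letters (line : String) (out : Int) : Prop := out = count_common_letters_alt line
instance (line : String) (out : Int) : Decidable (Spec_count_common_letters line out) := by unfold Spec_count_common_letters; infer_instance

-- ===== CLAIM (what is proved, stated in full; the proofs are below) =====
def Claim_equal_count_common_letters : Prop := ∀ (line : String), Dom_count_common_letters line → Spec_count_common_letters line (count_common_letters line)

-- ===== LEMMAS AND PROOFS =====

theorem mem_foldl_inter (ss : List (PySem.Set Char)) (s0 : PySem.Set Char) (x : Char) :
    x ∈ ss.foldl (fun i s => PySem.Set.inter i s) s0 ↔ x ∈ s0 ∧ ∀ s ∈ ss, x ∈ s := by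
  induction ss generalizing s0 with
  | nil => simp
  | cons t ts ih =>
    simp [List.foldl_cons, ih, PySem.Set.mem_inter]
    tauto

theorem nodup_foldl_inter (ss : List (PySem.Set Char)) (s0 : PySem.Set Char)
    (h : s0.Nodup) : (ss.foldl (fun i s => PySem.Set.inter i s) s0).Nodup := by
  induction ss generalizing s0 with
  | nil => exact h
  | cons t ts ih => exact ih _ (PySem.Set.nodup_inter s0 t h)

theorem keys_tally (L : List String) (d : PySem.Dict Char Int) :
    (L.foldl (fun d l => (PySem.Set.ofList l.toList).foldl
        (fun d c => PySem.Dict.modify d c 0 (· + 1)) d) d).keys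
      = L.foldl (fun ks l => PySem.Set.update ks (PySem.Set.ofList l.toList)) d.keys := by
  induction L generalizing d with
  | nil => rfl
  | cons l ls ih =>
    simp only [List.foldl_cons, ih, PySem.Dict.keys_foldl_modify]

theorem mem_foldl_update (L : List String) (ks : PySem.Set Char) (x : Char) :
    x ∈ L.foldl (fun ks l => PySem.Set.update ks (PySem.Set.ofList l.toList)) ks
      ↔ x ∈ ks ∨ ∃ l ∈ L, x ∈ l.toList := by
  induction L generalizing ks with
  | nil => simp
  | cons l ls ih =>
    simp [List.foldl_cons, ih, PySem.Set.mem_update, PySem.Set.mem_ofList]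
    tauto

theorem nodup_foldl_update (L : List String) (ks : PySem.Set Char) (h : ks.Nodup) :
    (L.foldl (fun ks l => PySem.Set.update ks (PySem.Set.ofList l.toList)) ks).Nodup := by
  induction L generalizing ks with
  | nil => exact h
  | cons l ls ih => exact ih _ (PySem.Set.nodup_update ks _ h)

theorem count_ofList (xs : List Char) (c : Char) :
    ((PySem.Set.ofList xs).count c : Int) = if c ∈ xs then 1 else 0 := by
  by_cases h : c ∈ xs
  · rw [List.count_eq_one_of_mem (PySem.Set.nodup_ofList xs) ((PySem.Set.mem_ofList _ _).2 h)]
    simp [h]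
  · rw [List.count_eq_zero.2 (fun hm => h ((PySem.Set.mem_ofList _ _).1 hm))]
    simp [h]

theorem getD_tally (L : List String) (d : PySem.Dict Char Int) (c : Char) :
    (L.foldl (fun d l => (PySem.Set.ofList l.toList).foldl
        (fun d c => PySem.Dict.modify d c 0 (· + 1)) d) d).getD c 0
      = d.getD c 0 + (L.countP (fun l => decide (c ∈ l.toList)) : Int) := by
  induction L generalizing d with
  | nil => simp
  | cons l ls ih =>
    simp only [List.foldl_cons, ih, PySem.Dict.getD_foldl_modify_add_one, count_ofList,
      List.countP_cons]
    by_cases h : c ∈ l.toList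
    · simp [h]; ring
    · simp [h]

theorem core_eq (L : List String) (l0 : String) (rest : List String) (hL : L = l0 :: rest) :
    ((L.map (fun l => PySem.Set.ofList l.toList)).foldl
        (fun i s => PySem.Set.inter i s) (PySem.Set.ofList l0.toList)).length
      = (L.foldl (fun d l => (PySem.Set.ofList l.toList).foldl
            (fun d c => PySem.Dict.modify d c 0 (· + 1)) d)
          (PySem.Dict.empty : PySem.Dict Char Int)).values.countP
          (fun v => v == (L.length : Int)) := by
  set tally := L.foldl (fun d l => (PySem.Set.ofList l.toList).foldl
      (fun d c => PySem.Dict.modify d c 0 (· + 1)) d)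
      (PySem.Dict.empty : PySem.Dict Char Int) with htally
  have hkeys : tally.keys = L.foldl
      (fun ks l => PySem.Set.update ks (PySem.Set.ofList l.toList)) [] := by
    simpa using keys_tally L PySem.Dict.empty
  have hnodupk : tally.keys.Nodup := by
    rw [hkeys]; exact nodup_foldl_update L [] List.nodup_nil
  have hvals : tally.values = tally.keys.map (fun k => tally.getD k 0) :=
    PySem.Dict.values_eq_map_keys tally hnodupk 0
  rw [hvals, List.countP_map, List.countP_eq_length_filter]
  apply List.Perm.length_eq
  rw [List.perm_ext_iff_of_nodup
    (nodup_foldl_inter _ _ (PySem.Set.nodup_ofList _))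
    (List.Nodup.filter _ hnodupk)]
  intro x
  rw [mem_foldl_inter, List.mem_filter]
  have hget : tally.getD x 0 = (L.countP (fun l => decide (x ∈ l.toList)) : Int) := by
    rw [htally, getD_tally]; simp
  constructor
  · rintro ⟨hx0, hall⟩
    have hallL : ∀ l ∈ L, x ∈ l.toList := by
      intro l hl
      exact (PySem.Set.mem_ofList _ _).1
        (hall (PySem.Set.ofList l.toList) (List.mem_map_of_mem hl))
    refine ⟨?_, ?_⟩
    · rw [hkeys, mem_foldl_update]
      exact Or.inr ⟨l0, by rw [hL]; exact List.mem_cons_self,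
        hallL l0 (by rw [hL]; exact List.mem_cons_self)⟩
    · simp only [Function.comp, beq_iff_eq, hget]
      have : L.countP (fun l => decide (x ∈ l.toList)) = L.length :=
        List.countP_eq_length.2 (fun l hl => by simpa using hallL l hl)
      simp [this]
  · rintro ⟨hxk, hq⟩
    simp only [Function.comp, beq_iff_eq, hget] at hq
    have hcnt : L.countP (fun l => decide (x ∈ l.toList)) = L.length := by
      exact_mod_cast hq
    have hallL : ∀ l ∈ L, x ∈ l.toList := by
      intro l hl
      simpa using List.countP_eq_length.1 hcnt l hl
    refine ⟨(PySem.Set.mem_ofList _ _).2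
      (hallL l0 (by rw [hL]; exact List.mem_cons_self)), ?_⟩
    intro s hs
    rcases List.mem_map.1 hs with ⟨l, hl, rfl⟩
    exact (PySem.Set.mem_ofList _ _).2 (hallL l hl)

theorem sets_eq_map (L : List String) :
    L.foldl (fun sets l => sets ++ [l.toList.foldl
        (fun s c => PySem.Set.add s c) PySem.Set.empty]) []
      = L.map (fun l => PySem.Set.ofList l.toList) := by
  have := PySem.List.foldl_append_singleton_eq_map
    (f := fun l : String => l.toList.foldl (fun s c => PySem.Set.add s c) PySem.Set.empty) (l := L)
  simpa [PySem.Set.ofList_eq_foldl] using this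

-- ===== VERDICT (by name: the statement is the Claim_ definition above) =====
theorem count_common_letters_spec : Claim_equal_count_common_letters := by
  intro line _
  unfold Spec_count_common_letters count_common_letters count_common_letters_alt
  simp only [sets_eq_map]
  rcases hL : (PySem.Str.split? line "\n").getD [] with _ | ⟨l0, rest⟩
  · simp
  · simp only [List.map_cons]
    have := core_eq (l0 :: rest) l0 rest rfl
    rw [List.map_cons] at this
    exact_mod_cast this
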